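-- pv_equiv track=rewrite | github.com/dddddun/Algorithm | ECT/dynamic_programming/Question01.py | solution
-- ===== SOURCE A (Python) =====
-- def solution(n, m, g):
--     dp = [[0] * m for _ in range(n)]
--     for i in range(n * m):
--         dp[i // m][i % m] = g[i]
--
--     # 열을 고정하고 행별로 값을 비교한다.
--     for j in range(1, m):
--         for i in range(n):
--
--             # 왼쪽 위에서 오는 경우
--             if i == 0:
--                 left_up = 0
--             else:
--                 left_up = dp[i - 1][j - 1]
--
--             # 왼쪽에서 오는 경우
--             left = dp[i][j - 1]
--
--             # 왼쪽 아래에서 오는 경우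
--             if i == n - 1:
--                 left_down = 0
--             else:
--                 left_down = dp[i + 1][j - 1]
--
--             # 세가지 경우의 수 중 가장 큰 값을 더한다.
--             dp[i][j] = dp[i][j] + max(left_up, left, left_down)
--
--     answer = 0
--     # m - 1 열에 있는 값들 중 가장 큰 값이 answer
--     for i in range(n):
--         answer = max(answer, dp[i][m - 1])
--
--     return answer
-- ===== SOURCE B (Python) =====
-- def solution(n, m, g):
--     # top-down memoized recursion over the same recurrence (A is bottom-up in-place)
--     memo = {}
--
--     def f(i, j):
--         if (i, j) in memo:
--             return memo[(i, j)]
--         if j == 0: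
--             v = g[i * m]
--         else:
--             lu = f(i - 1, j - 1) if i > 0 else 0
--             ld = f(i + 1, j - 1) if i < n - 1 else 0
--             v = g[i * m + j] + max(lu, f(i, j - 1), ld)
--         memo[(i, j)] = v
--         return v
--
--     answer = 0
--     for i in range(n):
--         answer = max(answer, f(i, m - 1))
--     return answer
-- ===== Notes on version B (the rewrite author's own statement) =====
-- stated objective: alternative
-- what changed: Replaces A's bottom-up column sweep over an in-place n*m table with a top-down memoized recursion f(i,j) on the same recurrence, caching values in a dict and never materialising the 2D table.
-- crash fix: On n < 0 and m < 0 A raises IndexError (n*m > 0 makes the fill loop index the empty dp list) while B's empty range(n) loop simply returns 0. — e.g. on solution(-1, -1, []): A raises IndexError, B returns 0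
import Mathlib
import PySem

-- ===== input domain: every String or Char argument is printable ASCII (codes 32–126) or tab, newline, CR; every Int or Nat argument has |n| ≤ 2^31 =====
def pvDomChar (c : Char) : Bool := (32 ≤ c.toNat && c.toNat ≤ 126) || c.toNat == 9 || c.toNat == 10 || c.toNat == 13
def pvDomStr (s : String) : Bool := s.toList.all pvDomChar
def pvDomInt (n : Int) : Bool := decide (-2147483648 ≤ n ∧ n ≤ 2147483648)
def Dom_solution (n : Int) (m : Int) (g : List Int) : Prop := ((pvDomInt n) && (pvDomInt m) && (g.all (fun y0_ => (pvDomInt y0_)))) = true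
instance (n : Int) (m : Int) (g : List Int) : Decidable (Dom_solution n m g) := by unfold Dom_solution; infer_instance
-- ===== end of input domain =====

-- B replaces A's bottom-up in-place column sweep over an n×m table with a top-down
-- memoized recursion on the same recurrence (objective: alternative, same asymptotic cost).

-- ===== PORT A =====
-- dp[i][j] read (Python list indexing; all accesses are in range inside Pre_)
def pvGetE (dp : List (List Int)) (i j : Nat) : Int := (dp.getD i []).getD j 0
-- dp[i][j] = v
def pvSet2 (dp : List (List Int)) (i j : Nat) (v : Int) : List (List Int) :=
  dp.set i ((dp.getD i []).set j v)

def solution (n : Int) (m : Int) (g : List Int) : Int :=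
  -- dp = [[0] * m for _ in range(n)]
  let dp0 : List (List Int) := List.replicate n.toNat (List.replicate m.toNat 0)
  -- for i in range(n * m): dp[i // m][i % m] = g[i]
  let dp1 := (List.range (n * m).toNat).foldl
    (fun dp (k : Nat) => pvSet2 dp ((PySem.Int.floordiv (k : Int) m).toNat)
                          ((PySem.Int.mod (k : Int) m).toNat) (g.getD k 0)) dp0
  -- for j in range(1, m): for i in range(n): …
  let dp2 := (List.range' 1 (m.toNat - 1)).foldl
    (fun dp (j : Nat) => (List.range n.toNat).foldl (fun dp' (i : Nat) =>
        let lu : Int := if i = 0 then 0 else pvGetE dp' (i - 1) (j - 1)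
        let l  : Int := pvGetE dp' i (j - 1)
        let ld : Int := if (i : Int) = n - 1 then 0 else pvGetE dp' (i + 1) (j - 1)
        pvSet2 dp' i j (pvGetE dp' i j + max lu (max l ld))) dp) dp1
  -- answer = 0; for i in range(n): answer = max(answer, dp[i][m - 1])
  (List.range n.toNat).foldl (fun (a : Int) (i : Nat) => max a (pvGetE dp2 i (m.toNat - 1))) 0

-- ===== PORT B =====
-- the memoized recursive helper f(i, j), with the memo dict threaded through
def pvFB (n m : Int) (g : List Int) :
    Nat → Int → PySem.Dict (Int × Int) Int → Int × PySem.Dict (Int × Int) Int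
  | 0, i, memo =>
    match memo.get? (i, 0) with
    | some v => (v, memo)
    | none =>
      let v := g.getD (i * m).toNat 0
      (v, memo.insert (i, 0) v)
  | j + 1, i, memo =>
    match memo.get? (i, (j : Int) + 1) with
    | some v => (v, memo)
    | none =>
      let p1 := if i > 0 then pvFB n m g j (i - 1) memo else (0, memo)
      let p2 := pvFB n m g j i p1.2
      let p3 := if i < n - 1 then pvFB n m g j (i + 1) p2.2 else (0, p2.2)
      let v := g.getD (i * m + ((j : Int) + 1)).toNat 0 + max p1.1 (max p2.1 p3.1)
      (v, p3.2.insert (i, (j : Int) + 1) v)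

def solution_alt (n : Int) (m : Int) (g : List Int) : Int :=
  ((List.range n.toNat).foldl (fun (s : Int × PySem.Dict (Int × Int) Int) (i : Nat) =>
      let p := pvFB n m g (m.toNat - 1) (i : Int) s.2
      (max s.1 p.1, p.2)) (0, PySem.Dict.empty)).1

-- ===== PRECONDITION & SPEC =====
-- Pre_ excludes exactly the inputs on which A raises IndexError: a positive n with
-- m ≤ 0 or with fewer than n*m grid values, and n < 0 together with m < 0.
def Pre_solution (n : Int) (m : Int) (g : List Int) : Prop :=
  (0 < n → 1 ≤ m ∧ n * m ≤ (g.length : Int)) ∧ (n < 0 → 0 ≤ m)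
instance (n : Int) (m : Int) (g : List Int) : Decidable (Pre_solution n m g) := by
  unfold Pre_solution; infer_instance

def pvWitness_solution : Int × Int × List Int := (2, 3, [1, -2, 3, 4, 5, -6])

-- On n < 0 and m < 0 A raises IndexError (n*m > 0 makes the fill loop index the
-- empty dp list) while B's empty range(n) loop simply returns 0.
def Raises_solution (n : Int) (m : Int) (g : List Int) : Prop := n < 0 ∧ m < 0
instance (n : Int) (m : Int) (g : List Int) : Decidable (Raises_solution n m g) := by
  unfold Raises_solution; infer_instance
def pvRaiseWitness_solution : Int × Int × List Int := (-1, -1, [])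
def pvRaiseWitnessOut_solution : Int := 0

def Spec_solution (n : Int) (m : Int) (g : List Int) (out : Int) : Prop := out = solution_alt n m g
instance (n : Int) (m : Int) (g : List Int) (out : Int) : Decidable (Spec_solution n m g out) := by
  unfold Spec_solution; infer_instance

-- ===== CLAIM (what is proved, stated in full; the proofs are below) =====
def Claim_equal_solution : Prop := ∀ (n : Int) (m : Int) (g : List Int),
  Dom_solution n m g → Pre_solution n m g → Spec_solution n m g (solution n m g)
def Claim_raises_solution : Prop :=
  (∀ (n : Int) (m : Int) (g : List Int), Dom_solution n m g → Raises_solution n m g → ¬ Pre_solution n m g) ∧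
  (Dom_solution (pvRaiseWitness_solution.1) (pvRaiseWitness_solution.2.1) (pvRaiseWitness_solution.2.2) ∧
   Raises_solution (pvRaiseWitness_solution.1) (pvRaiseWitness_solution.2.1) (pvRaiseWitness_solution.2.2) ∧
   solution_alt (pvRaiseWitness_solution.1) (pvRaiseWitness_solution.2.1) (pvRaiseWitness_solution.2.2) = pvRaiseWitnessOut_solution)

-- ===== LEMMAS AND PROOFS =====

-- the pure value both programs compute for cell (i, j)
def pvFP (n m : Int) (g : List Int) : Nat → Int → Int
  | 0, i => g.getD (i * m).toNat 0
  | j + 1, i =>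
      g.getD (i * m + ((j : Int) + 1)).toNat 0 +
      max (if i > 0 then pvFP n m g j (i - 1) else 0)
          (max (pvFP n m g j i) (if i < n - 1 then pvFP n m g j (i + 1) else 0))

-- every memo entry is the pure value of its cell
def pvMInv (n m : Int) (g : List Int) (d : PySem.Dict (Int × Int) Int) : Prop :=
  ∀ i j v, d.get? (i, j) = some v → 0 ≤ j ∧ v = pvFP n m g j.toNat i

theorem pvFB_correct (n m : Int) (g : List Int) :
    ∀ (j : Nat) (i : Int) (memo : PySem.Dict (Int × Int) Int), pvMInv n m g memo →
      (pvFB n m g j i memo).1 = pvFP n m g j i ∧ pvMInv n m g (pvFB n m g j i memo).2 := by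
  intro j
  induction j with
  | zero =>
    intro i memo hinv
    rcases hget : memo.get? (i, (0 : Int)) with _ | v
    · refine ⟨by simp [pvFB, hget, pvFP], ?_⟩
      intro i' j' v' h'
      simp only [pvFB, hget] at h'
      rw [PySem.Dict.get?_insert] at h'
      split at h'
      · rename_i heq
        obtain ⟨hi', hj'⟩ := Prod.mk.injEq .. ▸ heq
        injection h' with h'
        subst hi' hj'
        simp [pvFP, ← h']
      · exact hinv i' j' v' h'
    · have := hinv i 0 v hget
      refine ⟨?_, by simpa [pvFB, hget] using hinv⟩
      simp only [pvFB, hget]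
      simpa using this.2
  | succ j ih =>
    intro i memo hinv
    rcases hget : memo.get? (i, (j : Int) + 1) with _ | v
    · have H1 : (if i > 0 then pvFB n m g j (i - 1) memo else (0, memo)).1
          = (if i > 0 then pvFP n m g j (i - 1) else 0) ∧
          pvMInv n m g (if i > 0 then pvFB n m g j (i - 1) memo else (0, memo)).2 := by
        by_cases h : i > 0
        · simpa [h] using ih (i - 1) memo hinv
        · exact ⟨by simp [h], by simpa [h] using hinv⟩
      have H2 := ih i _ H1.2
      have H3 : (if i < n - 1 then pvFB n m g j (i + 1) (pvFB n m g j i (if i > 0 then pvFB n m g j (i - 1) memo else (0, memo)).2).2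
            else (0, (pvFB n m g j i (if i > 0 then pvFB n m g j (i - 1) memo else (0, memo)).2).2)).1
          = (if i < n - 1 then pvFP n m g j (i + 1) else 0) ∧
          pvMInv n m g (if i < n - 1 then pvFB n m g j (i + 1) (pvFB n m g j i (if i > 0 then pvFB n m g j (i - 1) memo else (0, memo)).2).2
            else (0, (pvFB n m g j i (if i > 0 then pvFB n m g j (i - 1) memo else (0, memo)).2).2)).2 := by
        by_cases h : i < n - 1
        · simpa [h] using ih (i + 1) _ H2.2
        · exact ⟨by simp [h], by simpa [h] using H2.2⟩
      have hval : g.getD (i * m + ((j : Int) + 1)).toNat 0 +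
          max (if i > 0 then pvFB n m g j (i - 1) memo else (0, memo)).1
            (max (pvFB n m g j i (if i > 0 then pvFB n m g j (i - 1) memo else (0, memo)).2).1
              (if i < n - 1 then pvFB n m g j (i + 1) (pvFB n m g j i (if i > 0 then pvFB n m g j (i - 1) memo else (0, memo)).2).2
                 else (0, (pvFB n m g j i (if i > 0 then pvFB n m g j (i - 1) memo else (0, memo)).2).2)).1)
          = pvFP n m g (j + 1) i := by
        rw [H1.1, H2.1, H3.1]; rfl
      constructor
      · simp only [pvFB, hget]
        exact hval
      · simp only [pvFB, hget]
        intro i' j' v' h'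
        rw [PySem.Dict.get?_insert] at h'
        split at h'
        · rename_i heq
          obtain ⟨hi', hj'⟩ := Prod.mk.injEq .. ▸ heq
          injection h' with h'
          subst hi' hj'
          rw [← h', hval]
          refine ⟨by omega, ?_⟩
          norm_num
        · exact H3.2 i' j' v' h'
    · have := hinv i ((j : Int) + 1) v hget
      refine ⟨?_, by simpa [pvFB, hget] using hinv⟩
      simp only [pvFB, hget]
      have h2 := this.2
      rwa [show ((j : Int) + 1).toNat = j + 1 by omega] at h2

theorem solution_alt_eq_fold (n m : Int) (g : List Int) :
    solution_alt n m g =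
      (List.range n.toNat).foldl (fun (a : Int) (i : Nat) => max a (pvFP n m g (m.toNat - 1) (i : Int))) 0 := by
  have key : ∀ (l : List Nat) (a : Int) (memo : PySem.Dict (Int × Int) Int), pvMInv n m g memo →
      (l.foldl (fun (s : Int × PySem.Dict (Int × Int) Int) (i : Nat) =>
        let p := pvFB n m g (m.toNat - 1) (i : Int) s.2
        (max s.1 p.1, p.2)) (a, memo)).1
      = l.foldl (fun (a : Int) (i : Nat) => max a (pvFP n m g (m.toNat - 1) (i : Int))) a := by
    intro l
    induction l with
    | nil => intro a memo _; rfl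
    | cons x l ihl =>
      intro a memo hinv
      have h := pvFB_correct n m g (m.toNat - 1) (x : Int) memo hinv
      simp only [List.foldl_cons]
      rw [ihl _ _ h.2, h.1]
  unfold solution_alt
  apply key
  intro i j v h
  simp [PySem.Dict.get?_empty] at h

-- ----- A side -----
def pvShape (n' m' : Nat) (dp : List (List Int)) : Prop :=
  dp.length = n' ∧ ∀ i, i < n' → (dp.getD i []).length = m'

theorem pvGetD_set_self {α : Type} {l : List α} {i : Nat} {a d : α}
    (h : i < l.length) : (l.set i a).getD i d = a := by
  rw [List.getD_eq_getElem?_getD, List.getElem?_set_self h]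
  rfl

theorem pvGetD_set_ne {α : Type} {l : List α} {i j : Nat} {a d : α}
    (h : i ≠ j) : (l.set i a).getD j d = l.getD j d := by
  rw [List.getD_eq_getElem?_getD, List.getElem?_set_ne h, ← List.getD_eq_getElem?_getD]

theorem pvGetE_set2_self {dp : List (List Int)} {i j : Nat} {v : Int}
    (h1 : i < dp.length) (h2 : j < (dp.getD i []).length) :
    pvGetE (pvSet2 dp i j v) i j = v := by
  unfold pvGetE pvSet2
  rw [pvGetD_set_self h1, pvGetD_set_self h2]

theorem pvGetE_set2_of_ne {dp : List (List Int)} {i j i' j' : Nat} {v : Int}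
    (h : i' ≠ i ∨ j' ≠ j) :
    pvGetE (pvSet2 dp i j v) i' j' = pvGetE dp i' j' := by
  unfold pvGetE pvSet2
  rcases h with h | h
  · rw [pvGetD_set_ne (by omega)]
  · by_cases hi : i' = i
    · subst hi
      by_cases hlen : i' < dp.length
      · rw [pvGetD_set_self hlen, pvGetD_set_ne (by omega)]
      · rw [List.set_eq_of_length_le (by omega)]
    · rw [pvGetD_set_ne (by omega)]

theorem pvShape_set2 {n' m' : Nat} {dp : List (List Int)} {i j : Nat} {v : Int}
    (h : pvShape n' m' dp) : pvShape n' m' (pvSet2 dp i j v) := by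
  obtain ⟨hlen, hrow⟩ := h
  refine ⟨by simp [pvSet2, hlen], ?_⟩
  intro i' hi'
  unfold pvSet2
  by_cases hi : i' = i
  · subst hi
    by_cases hl : i' < dp.length
    · rw [pvGetD_set_self hl]
      simpa using hrow i' hi'
    · rw [List.set_eq_of_length_le (by omega)]
      exact hrow i' hi'
  · rw [pvGetD_set_ne (by omega)]
    exact hrow i' hi'

theorem pv_fill_step (g : List Int) (n' m' : Nat) (hm : 0 < m') (k : Nat) (hk : k < n' * m')
    (D : List (List Int)) (hs : pvShape n' m' D)
    (hv : ∀ i j, i < n' → j < m' → pvGetE D i j = if i * m' + j < k then g.getD (i * m' + j) 0 else 0) :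
    pvShape n' m' (pvSet2 D (k / m') (k % m') (g.getD k 0)) ∧
    ∀ i j, i < n' → j < m' →
      pvGetE (pvSet2 D (k / m') (k % m') (g.getD k 0)) i j
      = if i * m' + j < k + 1 then g.getD (i * m' + j) 0 else 0 := by
  have hi0 : k / m' < n' := (Nat.div_lt_iff_lt_mul hm).mpr hk
  have hj0 : k % m' < m' := Nat.mod_lt _ hm
  have hdm := Nat.div_add_mod k m'
  have hdec : (k / m') * m' + k % m' = k := by rw [Nat.mul_comm] at hdm; exact hdm
  refine ⟨pvShape_set2 hs, ?_⟩
  intro i j hi hj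
  by_cases hij : i = k / m' ∧ j = k % m'
  · obtain ⟨h1, h2⟩ := hij
    subst h1; subst h2
    rw [pvGetE_set2_self (by rw [hs.1]; exact hi0) (by rw [hs.2 _ hi0]; exact hj0)]
    rw [hdec]
    simp
  · rw [pvGetE_set2_of_ne (by tauto), hv i j hi hj]
    have hne : i * m' + j ≠ k := by
      intro he
      apply hij
      have e1 : (m' * i + j) / m' = i + j / m' := Nat.mul_add_div hm i j
      have e2 : (m' * i + j) % m' = j % m' := Nat.mul_add_mod m' i j
      rw [Nat.mul_comm m' i] at e1 e2
      rw [he] at e1 e2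
      constructor
      · rw [Nat.div_eq_of_lt hj] at e1; omega
      · rw [Nat.mod_eq_of_lt hj] at e2; omega
    by_cases hlt : i * m' + j < k
    · rw [if_pos hlt, if_pos (by omega)]
    · rw [if_neg hlt, if_neg (by omega)]

theorem pv_fill_inv (g : List Int) (n' m' : Nat) (hm : 0 < m') :
    ∀ k, k ≤ n' * m' →
      pvShape n' m' ((List.range k).foldl
        (fun dp (t : Nat) => pvSet2 dp ((PySem.Int.floordiv (t : Int) (m' : Int)).toNat)
                              ((PySem.Int.mod (t : Int) (m' : Int)).toNat) (g.getD t 0))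
        (List.replicate n' (List.replicate m' 0))) ∧
      ∀ i j, i < n' → j < m' →
        pvGetE ((List.range k).foldl
          (fun dp (t : Nat) => pvSet2 dp ((PySem.Int.floordiv (t : Int) (m' : Int)).toNat)
                                ((PySem.Int.mod (t : Int) (m' : Int)).toNat) (g.getD t 0))
          (List.replicate n' (List.replicate m' 0))) i j
        = if i * m' + j < k then g.getD (i * m' + j) 0 else 0 := by
  intro k
  induction k with
  | zero =>
    intro _
    refine ⟨⟨by simp, ?_⟩, ?_⟩
    · intro i hi
      simp [List.getD_eq_getElem?_getD, List.getElem?_replicate, hi]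
    · intro i j hi hj
      simp [pvGetE, List.getD_eq_getElem?_getD, List.getElem?_replicate, hi, hj]
  | succ k ih =>
    intro hk
    obtain ⟨ihs, ihv⟩ := ih (by omega)
    rw [List.range_succ, List.foldl_append, List.foldl_cons, List.foldl_nil]
    have hdiv : ((PySem.Int.floordiv (k : Int) (m' : Int)).toNat) = k / m' := by
      rw [PySem.Int.floordiv_natCast, Int.toNat_natCast]
    have hmod : ((PySem.Int.mod (k : Int) (m' : Int)).toNat) = k % m' := by
      rw [PySem.Int.mod_natCast, Int.toNat_natCast]
    rw [hdiv, hmod]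
    exact pv_fill_step g n' m' hm k (by omega) _ ihs ihv

theorem pv_inner_step (g : List Int) (n' m' : Nat) (jj : Nat) (hj2 : jj + 1 < m')
    (r : Nat) (hr : r < n') (D : List (List Int)) (hs : pvShape n' m' D)
    (hv : ∀ i j, i < n' → j < m' → pvGetE D i j =
      if j < jj + 1 ∨ (j = jj + 1 ∧ i < r) then pvFP (n' : Int) (m' : Int) g j (i : Int)
      else g.getD (i * m' + j) 0) :
    pvShape n' m' (pvSet2 D r (jj + 1) (pvGetE D r (jj + 1) +
      max (if r = 0 then 0 else pvGetE D (r - 1) jj)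
        (max (pvGetE D r jj) (if (r : Int) = (n' : Int) - 1 then 0 else pvGetE D (r + 1) jj)))) ∧
    ∀ i j, i < n' → j < m' →
      pvGetE (pvSet2 D r (jj + 1) (pvGetE D r (jj + 1) +
        max (if r = 0 then 0 else pvGetE D (r - 1) jj)
          (max (pvGetE D r jj) (if (r : Int) = (n' : Int) - 1 then 0 else pvGetE D (r + 1) jj)))) i j =
      if j < jj + 1 ∨ (j = jj + 1 ∧ i < r + 1) then pvFP (n' : Int) (m' : Int) g j (i : Int)
      else g.getD (i * m' + j) 0 := by
  have hVeq : pvGetE D r (jj + 1) +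
      max (if r = 0 then 0 else pvGetE D (r - 1) jj)
        (max (pvGetE D r jj) (if (r : Int) = (n' : Int) - 1 then 0 else pvGetE D (r + 1) jj))
      = pvFP (n' : Int) (m' : Int) g (jj + 1) (r : Int) := by
    have hcur : pvGetE D r (jj + 1) = g.getD (r * m' + (jj + 1)) 0 := by
      rw [hv r (jj + 1) hr hj2, if_neg (by omega)]
    have hL : pvGetE D r jj = pvFP (n' : Int) (m' : Int) g jj (r : Int) := by
      rw [hv r jj hr (by omega), if_pos (by omega)]
    have eidx : (((r : Int)) * (m' : Int) + ((jj : Int) + 1)).toNat = r * m' + (jj + 1) := by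
      rw [show ((r : Int)) * (m' : Int) + ((jj : Int) + 1) = ((r * m' + (jj + 1) : Nat) : Int) by
        push_cast; ring, Int.toNat_natCast]
    have elu : (if r = 0 then (0 : Int) else pvGetE D (r - 1) jj)
        = (if (r : Int) > 0 then pvFP (n' : Int) (m' : Int) g jj ((r : Int) - 1) else 0) := by
      by_cases h0 : r = 0
      · rw [if_pos h0, if_neg (by omega)]
      · rw [if_neg h0, if_pos (by omega)]
        rw [hv (r - 1) jj (by omega) (by omega), if_pos (by omega)]
        rw [show ((r : Int)) - 1 = (((r - 1 : Nat)) : Int) by omega]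
    have eld : (if (r : Int) = (n' : Int) - 1 then (0 : Int) else pvGetE D (r + 1) jj)
        = (if (r : Int) < (n' : Int) - 1 then pvFP (n' : Int) (m' : Int) g jj ((r : Int) + 1) else 0) := by
      by_cases hend : (r : Int) = (n' : Int) - 1
      · rw [if_pos hend, if_neg (by omega)]
      · rw [if_neg hend, if_pos (by omega)]
        rw [hv (r + 1) jj (by omega) (by omega), if_pos (by omega)]
        rw [show ((r : Int)) + 1 = (((r + 1 : Nat)) : Int) by omega]
    rw [hcur, hL, elu, eld]
    conv_rhs => rw [pvFP]
    rw [eidx]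
  refine ⟨pvShape_set2 hs, ?_⟩
  intro i j hi hj
  by_cases hij : i = r ∧ j = jj + 1
  · obtain ⟨h1, h2⟩ := hij
    subst h1; subst h2
    rw [pvGetE_set2_self (by rw [hs.1]; exact hr) (by rw [hs.2 _ hr]; exact hj2)]
    rw [hVeq, if_pos (by omega)]
  · rw [pvGetE_set2_of_ne (by tauto), hv i j hi hj]
    by_cases hc : j < jj + 1 ∨ (j = jj + 1 ∧ i < r)
    · rw [if_pos hc, if_pos (by omega)]
    · rw [if_neg hc, if_neg (by omega)]

theorem pv_inner_inv (g : List Int) (n' m' : Nat) (jj : Nat) (hj2 : jj + 1 < m')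
    (dp : List (List Int)) (hs : pvShape n' m' dp)
    (hdp : ∀ i j, i < n' → j < m' → pvGetE dp i j =
      if j < jj + 1 then pvFP (n' : Int) (m' : Int) g j (i : Int) else g.getD (i * m' + j) 0) :
    ∀ r, r ≤ n' →
      pvShape n' m' ((List.range r).foldl (fun dp' (i : Nat) =>
        pvSet2 dp' i (jj + 1) (pvGetE dp' i (jj + 1) +
          max (if i = 0 then 0 else pvGetE dp' (i - 1) jj)
            (max (pvGetE dp' i jj)
              (if (i : Int) = (n' : Int) - 1 then 0 else pvGetE dp' (i + 1) jj)))) dp) ∧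
      ∀ i j, i < n' → j < m' →
        pvGetE ((List.range r).foldl (fun dp' (i : Nat) =>
          pvSet2 dp' i (jj + 1) (pvGetE dp' i (jj + 1) +
            max (if i = 0 then 0 else pvGetE dp' (i - 1) jj)
              (max (pvGetE dp' i jj)
                (if (i : Int) = (n' : Int) - 1 then 0 else pvGetE dp' (i + 1) jj)))) dp) i j =
        if j < jj + 1 ∨ (j = jj + 1 ∧ i < r) then pvFP (n' : Int) (m' : Int) g j (i : Int)
        else g.getD (i * m' + j) 0 := by
  intro r
  induction r with
  | zero =>
    intro _
    simp only [List.range_zero, List.foldl_nil]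
    refine ⟨hs, ?_⟩
    intro i j hi hj
    rw [hdp i j hi hj]
    by_cases h : j < jj + 1
    · rw [if_pos h, if_pos (Or.inl h)]
    · rw [if_neg h, if_neg (by omega)]
  | succ r ihr =>
    intro hr
    obtain ⟨ihs, ihv⟩ := ihr (by omega)
    simp only [List.range_succ, List.foldl_append, List.foldl_cons, List.foldl_nil]
    exact pv_inner_step g n' m' jj hj2 r (by omega) _ ihs ihv

theorem pv_outer_inv (g : List Int) (n' m' : Nat) (hm0 : 0 < m')
    (dp1 : List (List Int)) (hs : pvShape n' m' dp1)
    (hdp : ∀ i j, i < n' → j < m' → pvGetE dp1 i j = g.getD (i * m' + j) 0) :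
    ∀ c, c ≤ m' - 1 →
      pvShape n' m' ((List.range' 1 c).foldl (fun dp (j : Nat) =>
        (List.range n').foldl (fun dp' (i : Nat) =>
          pvSet2 dp' i j (pvGetE dp' i j +
            max (if i = 0 then 0 else pvGetE dp' (i - 1) (j - 1))
              (max (pvGetE dp' i (j - 1))
                (if (i : Int) = (n' : Int) - 1 then 0 else pvGetE dp' (i + 1) (j - 1))))) dp) dp1) ∧
      ∀ i j, i < n' → j < m' →
        pvGetE ((List.range' 1 c).foldl (fun dp (j : Nat) =>
          (List.range n').foldl (fun dp' (i : Nat) =>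
            pvSet2 dp' i j (pvGetE dp' i j +
              max (if i = 0 then 0 else pvGetE dp' (i - 1) (j - 1))
                (max (pvGetE dp' i (j - 1))
                  (if (i : Int) = (n' : Int) - 1 then 0 else pvGetE dp' (i + 1) (j - 1))))) dp) dp1) i j =
        if j ≤ c then pvFP (n' : Int) (m' : Int) g j (i : Int) else g.getD (i * m' + j) 0 := by
  intro c
  induction c with
  | zero =>
    intro _
    simp only [List.range'_zero, List.foldl_nil]
    refine ⟨hs, ?_⟩
    intro i j hi hj
    rw [hdp i j hi hj]
    by_cases h0 : j = 0
    · subst h0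
      rw [if_pos (by omega)]
      show g.getD (i * m' + 0) 0 = pvFP (n' : Int) (m' : Int) g 0 (i : Int)
      rw [pvFP]
      rw [show ((i : Int)) * (m' : Int) = ((i * m' : Nat) : Int) by push_cast; ring, Int.toNat_natCast]
      rw [Nat.add_zero]
    · rw [if_neg (by omega)]
  | succ c ihc =>
    intro hc
    obtain ⟨ihs, ihv⟩ := ihc (by omega)
    rw [List.range'_concat]
    simp only [Nat.one_mul, List.foldl_append, List.foldl_cons, List.foldl_nil]
    simp only [show (1 : Nat) + c = c + 1 from by omega, Nat.add_sub_cancel]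
    have hinner := pv_inner_inv g n' m' c (by omega) _ ihs
      (by
        intro i j hi hj
        rw [ihv i j hi hj]
        by_cases h : j ≤ c
        · rw [if_pos h, if_pos (by omega)]
        · rw [if_neg h, if_neg (by omega)]) n' (le_refl n')
    refine ⟨hinner.1, ?_⟩
    intro i j hi hj
    rw [hinner.2 i j hi hj]
    by_cases h : j < c + 1 ∨ (j = c + 1 ∧ i < n')
    · rw [if_pos h, if_pos (by omega)]
    · rw [if_neg h, if_neg (by omega)]

-- ===== VERDICT (by name: the statement is the Claim_ definition above) =====
theorem solution_spec : Claim_equal_solution := by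
  intro n m g _ hpre
  unfold Spec_solution
  by_cases hn : n ≤ 0
  · have hn0 : n.toNat = 0 := by omega
    have h1 : solution n m g = 0 := by
      unfold solution
      simp only [hn0, List.range_zero, List.foldl_nil]
    have h2 : solution_alt n m g = 0 := by
      unfold solution_alt
      simp only [hn0, List.range_zero, List.foldl_nil]
    rw [h1, h2]
  · obtain ⟨hm1, hlen⟩ := hpre.1 (by omega)
    rw [solution_alt_eq_fold]
    obtain ⟨n', rfl⟩ : ∃ k : Nat, n = (k : Int) := ⟨n.toNat, by omega⟩
    obtain ⟨m', rfl⟩ : ∃ k : Nat, m = (k : Int) := ⟨m.toNat, by omega⟩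
    have hn' : 0 < n' := by omega
    have hm' : 0 < m' := by omega
    have hglen : n' * m' ≤ g.length := by
      have : ((n' * m' : Nat) : Int) ≤ (g.length : Int) := by push_cast; push_cast at hlen; omega
      omega
    unfold solution
    rw [show ((n' : Int) * (m' : Int)) = ((n' * m' : Nat) : Int) from by push_cast; ring]
    simp only [Int.toNat_natCast]
    obtain ⟨hs1, hv1⟩ := pv_fill_inv g n' m' hm' (n' * m') (le_refl _)
    have hraw : ∀ i j, i < n' → j < m' →
        pvGetE ((List.range (n' * m')).foldl
          (fun dp (t : Nat) => pvSet2 dp ((PySem.Int.floordiv (t : Int) (m' : Int)).toNat)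
            ((PySem.Int.mod (t : Int) (m' : Int)).toNat) (g.getD t 0))
          (List.replicate n' (List.replicate m' 0))) i j = g.getD (i * m' + j) 0 := by
      intro i j hi hj
      rw [hv1 i j hi hj]
      have hb : i * m' + m' ≤ n' * m' := by
        rw [← Nat.succ_mul]
        exact Nat.mul_le_mul_right _ (by omega)
      rw [if_pos (by omega)]
    have houter := pv_outer_inv g n' m' hm' _ hs1 hraw (m' - 1) (le_refl _)
    apply PySem.List.foldl_congr_mem
    intro acc x hx
    rw [houter.2 x (m' - 1) (List.mem_range.mp hx) (by omega), if_pos (le_refl _)]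

@[simp] theorem solution_raises : Claim_raises_solution := by
  unfold Claim_raises_solution
  constructor
  · intro n m g _ hr hp
    unfold Raises_solution at hr
    unfold Pre_solution at hp
    have := hp.2 hr.1
    omega
  · refine ⟨by decide, by decide, by decide⟩
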